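-- pv_equiv track=rewrite | github.com/cowboy0525/wandai | backend/app/services/context_manager.py | _are_agents_related
-- ===== SOURCE A (Python) =====
-- def _are_agents_related(agent1: str, agent2: str) -> bool:
--     """Check if two agents are related in the workflow"""
--     # Define agent relationships
--     agent_groups = {
--         "planning": ["planner", "coordinator"],
--         "execution": ["research", "analysis", "creator"],
--         "review": ["coordinator", "planner"]
--     }
--
--     for group in agent_groups.values():
--         if agent1.lower() in group and agent2.lower() in group:
--             return True
--
--     return False
-- ===== SOURCE B (Python) =====
-- def _are_agents_related(agent1: str, agent2: str) -> bool:
--     """Check if two agents are related in the workflow"""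
--     # The group structure is a partition: "planning" and "review" contain the
--     # same members, so relatedness collapses to "same team".
--     team = {
--         "planner": "planning",
--         "coordinator": "planning",
--         "research": "execution",
--         "analysis": "execution",
--         "creator": "execution",
--     }
--     t1 = team.get(agent1.lower())
--     t2 = team.get(agent2.lower())
--     return t1 is not None and t1 == t2
-- ===== Notes on version B (the rewrite author's own statement) =====
-- stated objective: simpler
-- what changed: Replaces the loop over groups with double membership scans by a single flat agent-to-team lookup table (the groups form a partition, since 'planning' and 'review' have identical members), returning whether both agents map to the same team.
import Mathlib
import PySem

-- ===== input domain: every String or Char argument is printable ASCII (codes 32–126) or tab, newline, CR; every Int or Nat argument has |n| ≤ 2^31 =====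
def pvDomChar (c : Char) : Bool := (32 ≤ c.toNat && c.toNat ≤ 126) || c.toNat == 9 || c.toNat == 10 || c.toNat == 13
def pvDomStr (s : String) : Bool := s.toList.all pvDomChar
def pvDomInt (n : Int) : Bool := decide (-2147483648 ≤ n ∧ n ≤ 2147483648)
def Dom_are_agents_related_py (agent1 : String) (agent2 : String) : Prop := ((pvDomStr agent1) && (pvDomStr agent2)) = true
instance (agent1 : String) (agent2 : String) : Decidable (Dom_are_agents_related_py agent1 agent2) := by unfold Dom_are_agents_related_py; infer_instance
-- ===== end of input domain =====

-- B replaces A's loop over groups with membership scans by a flat agent-to-team lookup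
-- (the groups form a partition: "planning" and "review" have identical members), so
-- relatedness is "both agents map to the same team" (objective: simpler).

-- ===== PORT A =====
def are_agents_related_py (agent1 : String) (agent2 : String) : Bool :=
  let agent_groups : PySem.Dict String (List String) :=
    PySem.Dict.ofList [("planning", ["planner", "coordinator"]),
                       ("execution", ["research", "analysis", "creator"]),
                       ("review", ["coordinator", "planner"])]
  -- 'for group in agent_groups.values(): if … in group and … in group: return True' / 'return False'
  agent_groups.values.any (fun group =>
    group.contains (PySem.Str.lower agent1) && group.contains (PySem.Str.lower agent2))

-- ===== PORT B =====
def are_agents_related_py_alt (agent1 : String) (agent2 : String) : Bool :=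
  let team : PySem.Dict String String :=
    PySem.Dict.ofList [("planner", "planning"), ("coordinator", "planning"),
                       ("research", "execution"), ("analysis", "execution"),
                       ("creator", "execution")]
  let t1 := team.get? (PySem.Str.lower agent1)
  let t2 := team.get? (PySem.Str.lower agent2)
  -- 't1 is not None and t1 == t2'
  t1.isSome && t1 == t2

-- ===== PRECONDITION & SPEC =====
def Spec_are_agents_related_py (agent1 : String) (agent2 : String) (out : Bool) : Prop := out = are_agents_related_py_alt agent1 agent2
instance (agent1 : String) (agent2 : String) (out : Bool) : Decidable (Spec_are_agents_related_py agent1 agent2 out) := by unfold Spec_are_agents_related_py; infer_instance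

-- ===== CLAIM (what is proved, stated in full; the proofs are below) =====
def Claim_equal_are_agents_related_py : Prop := ∀ (agent1 : String) (agent2 : String), Dom_are_agents_related_py agent1 agent2 → Spec_are_agents_related_py agent1 agent2 (are_agents_related_py agent1 agent2)

-- ===== LEMMAS AND PROOFS =====

-- The flat team dict B uses, as a literal.
def pvTeamLit : PySem.Dict String String :=
  PySem.Dict.mk [("planner", "planning"), ("coordinator", "planning"),
                 ("research", "execution"), ("analysis", "execution"),
                 ("creator", "execution")]

theorem pvTeam_build :
    (PySem.Dict.ofList [("planner", "planning"), ("coordinator", "planning"),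
                        ("research", "execution"), ("analysis", "execution"),
                        ("creator", "execution")]) = pvTeamLit := by decide

theorem pvValues :
    (PySem.Dict.ofList [("planning", ["planner", "coordinator"]),
                        ("execution", ["research", "analysis", "creator"]),
                        ("review", ["coordinator", "planner"])]).values
    = [["planner","coordinator"],["research","analysis","creator"],["coordinator","planner"]] := by decide

-- A name that is none of the five agents is absent from the team dict …
theorem pvGet_other (y : String) (h1 : y ≠ "planner") (h2 : y ≠ "coordinator") (h3 : y ≠ "research")
    (h4 : y ≠ "analysis") (h5 : y ≠ "creator") :
    pvTeamLit.get? y = none := by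
  simp only [pvTeamLit, PySem.Dict.get?_mk_cons,
    beq_eq_false_iff_ne.mpr (Ne.symm h1), beq_eq_false_iff_ne.mpr (Ne.symm h2),
    beq_eq_false_iff_ne.mpr (Ne.symm h3), beq_eq_false_iff_ne.mpr (Ne.symm h4),
    beq_eq_false_iff_ne.mpr (Ne.symm h5), if_false, Bool.false_eq_true]
  rfl

-- … and is in none of the three group lists.
theorem pvContainsA (y : String) (h1 : y ≠ "planner") (h2 : y ≠ "coordinator") :
    (["planner","coordinator"] : List String).contains y = false := by simp [h1, h2]

theorem pvContainsB (y : String) (h3 : y ≠ "research") (h4 : y ≠ "analysis") (h5 : y ≠ "creator") :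
    (["research","analysis","creator"] : List String).contains y = false := by simp [h3, h4, h5]

theorem pvContainsC (y : String) (h2 : y ≠ "coordinator") (h1 : y ≠ "planner") :
    (["coordinator","planner"] : List String).contains y = false := by simp [h2, h1]

-- Core equation: A's any-over-groups equals B's same-team test, for arbitrary (lowered) names.
theorem pvCore (x y : String) :
    ([["planner","coordinator"],["research","analysis","creator"],["coordinator","planner"]] : List (List String)).any
      (fun group => group.contains x && group.contains y)
    = ((pvTeamLit.get? x).isSome && (pvTeamLit.get? x) == (pvTeamLit.get? y)) := by
  have hx : x = "planner" ∨ x = "coordinator" ∨ x = "research" ∨ x = "analysis" ∨ x = "creator" ∨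
      (x ≠ "planner" ∧ x ≠ "coordinator" ∧ x ≠ "research" ∧ x ≠ "analysis" ∧ x ≠ "creator") := by tauto
  have hy : y = "planner" ∨ y = "coordinator" ∨ y = "research" ∨ y = "analysis" ∨ y = "creator" ∨
      (y ≠ "planner" ∧ y ≠ "coordinator" ∧ y ≠ "research" ∧ y ≠ "analysis" ∧ y ≠ "creator") := by tauto
  rcases hx with rfl | rfl | rfl | rfl | rfl | ⟨hx1, hx2, hx3, hx4, hx5⟩ <;>
    rcases hy with rfl | rfl | rfl | rfl | rfl | ⟨hy1, hy2, hy3, hy4, hy5⟩ <;>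
      first
      | decide
      | (simp only [List.any_cons, List.any_nil]
         try simp only [pvGet_other x hx1 hx2 hx3 hx4 hx5, pvContainsA x hx1 hx2,
           pvContainsB x hx3 hx4 hx5, pvContainsC x hx2 hx1]
         try simp only [pvGet_other y hy1 hy2 hy3 hy4 hy5, pvContainsA y hy1 hy2,
           pvContainsB y hy3 hy4 hy5, pvContainsC y hy2 hy1]
         simp)

-- ===== VERDICT (by name: the statement is the Claim_ definition above) =====
theorem are_agents_related_py_spec : Claim_equal_are_agents_related_py := by
  intro agent1 agent2 _
  show are_agents_related_py agent1 agent2 = are_agents_related_py_alt agent1 agent2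
  simp only [are_agents_related_py, are_agents_related_py_alt]
  rw [pvTeam_build, pvValues]
  exact pvCore (PySem.Str.lower agent1) (PySem.Str.lower agent2)
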